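-- pv_equiv track=rewrite | github.com/adm1in/CodeTest-2 | lib/tamper/space2mysqldash.py | tamper
-- ===== SOURCE A (Python) =====
-- xrange = range
--
-- def tamper(payload, **kwargs):
--     """
--     Replaces space character (' ') with a dash comment ('--') followed by a new line ('\n')
--
--     Requirement:
--         * MySQL
--         * MSSQL
--
--     Notes:
--         * Useful to bypass several web application firewalls.
--
--     >>> tamper('1 AND 9227=9227')
--     '1--%0AAND--%0A9227=9227'
--     """
--
--     retVal = ""
--
--     if payload:
--         for i in xrange(len(payload)):
--             if payload[i].isspace():
--                 retVal += "--%0A"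
--             elif payload[i] == '#' or payload[i:i + 3] == '-- ':
--                 retVal += payload[i:]
--                 break
--             else:
--                 retVal += payload[i]
--
--     return retVal
-- ===== SOURCE B (Python) =====
-- def tamper(payload, **kwargs):
--     if not payload:
--         return ""
--     cut_hash = payload.find('#')
--     cut_dash = payload.find('-- ')
--     cuts = [c for c in (cut_hash, cut_dash) if c != -1]
--     cut = min(cuts) if cuts else len(payload)
--     return ''.join('--%0A' if c.isspace() else c for c in payload[:cut]) + payload[cut:]
-- ===== Notes on version B (the rewrite author's own statement) =====
-- stated objective: faster
-- what changed: Replaces the char-by-char scan with in-loop break detection and quadratic string += by a two-phase structure: locate the cut point once with str.find on the two comment markers, then transform the prefix with a join-comprehension and append the suffix verbatim.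
import Mathlib
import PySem

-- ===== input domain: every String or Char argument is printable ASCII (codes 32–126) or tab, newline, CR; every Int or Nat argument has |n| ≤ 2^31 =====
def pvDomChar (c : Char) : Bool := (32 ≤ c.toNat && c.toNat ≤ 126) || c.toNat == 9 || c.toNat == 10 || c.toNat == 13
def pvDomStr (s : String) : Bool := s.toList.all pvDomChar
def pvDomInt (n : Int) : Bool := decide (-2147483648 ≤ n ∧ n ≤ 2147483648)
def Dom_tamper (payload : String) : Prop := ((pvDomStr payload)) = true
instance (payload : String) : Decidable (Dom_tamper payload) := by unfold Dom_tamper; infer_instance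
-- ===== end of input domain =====

-- B changes the decomposition: locate the cut index once with find, then transform the prefix in one pass (measured faster: A appends to a string in a loop).

-- ===== PORT A =====
-- the for-loop over indices, taken as structural recursion over the remaining suffix
-- (payload[i] is the head, payload[i:i+3] is take 3 of the suffix, payload[i:] the suffix)
def tamperLoopA : List Char → List Char
  | [] => []
  | c :: rest =>
    if PySem.Chars.isspace c then "--%0A".toList ++ tamperLoopA rest
    else if c = '#' ∨ (c :: rest).take 3 = ['-', '-', ' '] then c :: rest
    else c :: tamperLoopA rest

def tamper (payload : String) : String :=
  if payload = "" then "" else String.mk (tamperLoopA payload.toList)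

-- ===== PORT B =====
def tamper_alt (payload : String) : String :=
  if payload = "" then "" else
  let cs := payload.toList
  let cutHash := PySem.Chars.find cs ['#']
  let cutDash := PySem.Chars.find cs ['-', '-', ' ']
  let cut : Nat :=
    if cutHash = -1 then (if cutDash = -1 then cs.length else cutDash.toNat)
    else if cutDash = -1 then cutHash.toNat else min cutHash.toNat cutDash.toNat
  String.mk ((cs.take cut).flatMap
      (fun c => if PySem.Chars.isspace c then "--%0A".toList else [c]) ++ cs.drop cut)

-- ===== PRECONDITION & SPEC =====
def Spec_tamper (payload : String) (out : String) : Prop := out = tamper_alt payload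
instance (payload : String) (out : String) : Decidable (Spec_tamper payload out) := by unfold Spec_tamper; infer_instance

-- ===== CLAIM (what is proved, stated in full; the proofs are below) =====
def Claim_equal_tamper : Prop := ∀ (payload : String), Dom_tamper payload → Spec_tamper payload (tamper payload)

-- ===== LEMMAS AND PROOFS =====

-- the "hit" predicate: A breaks at the first suffix where this holds
def pvHit (xs : List Char) : Bool := xs.take 1 = ['#'] ∨ xs.take 3 = ['-', '-', ' ']

-- first index at which pvHit holds, else the length
def pvFirstHit : List Char → Nat
  | [] => 0
  | c :: rest => if pvHit (c :: rest) then 0 else 1 + pvFirstHit rest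

lemma pvHit_not_isspace {c : Char} {rest : List Char} (h : pvHit (c :: rest) = true) :
    PySem.Chars.isspace c = false := by
  simp only [pvHit, Bool.decide_or, Bool.or_eq_true, decide_eq_true_eq] at h
  rcases h with h | h
  · simp [List.take] at h; subst h; decide
  · cases rest with
    | nil => simp [List.take] at h
    | cons d tl =>
      cases tl with
      | nil => simp [List.take] at h
      | cons e tl' =>
        simp [List.take] at h
        obtain ⟨rfl, -⟩ := h
        decide

lemma tamperLoopA_eq_cut (cs : List Char) :
    tamperLoopA cs =
      (cs.take (pvFirstHit cs)).flatMap
        (fun c => if PySem.Chars.isspace c then "--%0A".toList else [c]) ++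
      cs.drop (pvFirstHit cs) := by
  induction cs with
  | nil => simp [tamperLoopA, pvFirstHit]
  | cons c rest ih =>
    simp only [pvFirstHit]
    by_cases hh : pvHit (c :: rest) = true
    · have hsp := pvHit_not_isspace hh
      have hcond : c = '#' ∨ (c :: rest).take 3 = ['-', '-', ' '] := by
        rw [pvHit] at hh
        simp only [Bool.decide_or, Bool.or_eq_true, decide_eq_true_eq] at hh
        rcases hh with h | h
        · left; simpa [List.take] using h
        · right; exact h
      rw [if_pos hh]
      simp only [tamperLoopA]
      rw [if_neg (by simp [hsp]), if_pos hcond]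
      simp
    · have hcond : ¬ (c = '#' ∨ (c :: rest).take 3 = ['-', '-', ' ']) := by
        intro h
        apply hh
        rw [pvHit]
        simp only [Bool.decide_or, Bool.or_eq_true, decide_eq_true_eq]
        rcases h with h | h
        · left; simp [List.take, h]
        · right; exact h
      rw [if_neg hh, Nat.add_comm 1 (pvFirstHit rest), List.take_succ_cons, List.drop_succ_cons]
      simp only [tamperLoopA]
      by_cases hsp : PySem.Chars.isspace c = true
      · rw [if_pos hsp]
        simp [ih, hsp]
      · simp only [Bool.not_eq_true] at hsp
        rw [if_neg (by simp [hsp]), if_neg hcond]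
        simp [ih, hsp]

lemma pvFirstHit_le (cs : List Char) : pvFirstHit cs ≤ cs.length := by
  induction cs with
  | nil => simp [pvFirstHit]
  | cons c rest ih =>
    by_cases hh : pvHit (c :: rest) = true <;> simp [pvFirstHit, hh] <;> omega

lemma pvFirstHit_min (cs : List Char) : ∀ i < pvFirstHit cs, ¬ pvHit (cs.drop i) = true := by
  induction cs with
  | nil => simp [pvFirstHit]
  | cons c rest ih =>
    by_cases hh : pvHit (c :: rest) = true
    · simp [pvFirstHit, hh]
    · intro i hi
      simp only [pvFirstHit, if_neg hh] at hi
      cases i with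
      | zero => simpa using hh
      | succ j => exact ih j (by omega)

lemma pvFirstHit_hit (cs : List Char) (h : pvFirstHit cs < cs.length) :
    pvHit (cs.drop (pvFirstHit cs)) = true := by
  induction cs with
  | nil => simp [pvFirstHit] at h
  | cons c rest ih =>
    by_cases hh : pvHit (c :: rest) = true
    · simpa [pvFirstHit, hh] using hh
    · simp only [pvFirstHit, if_neg hh, List.length_cons] at h ⊢
      have hr : pvFirstHit rest < rest.length := by omega
      rw [Nat.add_comm 1 (pvFirstHit rest), List.drop_succ_cons]
      exact ih hr

-- pvHit as prefix statements
lemma pvHit_iff (xs : List Char) : pvHit xs = true ↔ (['#'] <+: xs ∨ ['-', '-', ' '] <+: xs) := by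
  unfold pvHit
  simp only [Bool.decide_or, Bool.or_eq_true, decide_eq_true_eq]
  constructor
  · rintro (h | h)
    · left; rw [List.prefix_iff_eq_take]; simpa using h.symm
    · right; rw [List.prefix_iff_eq_take]; simpa using h.symm
  · rintro (h | h)
    · left; rw [List.prefix_iff_eq_take] at h; simpa using h.symm
    · right; rw [List.prefix_iff_eq_take] at h; simpa using h.symm

lemma pvPrefix_drop_infix {sub cs : List Char} {i : Nat} (h : sub <+: cs.drop i) :
    sub <:+: cs :=
  h.isInfix.trans (cs.drop_suffix i).isInfix

-- uniqueness of the "first index with property, else length"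
lemma pvFirst_unique (n : Nat) (P : Nat → Prop) (m m' : Nat)
    (hm : m ≤ n) (hm1 : m < n → P m) (hm2 : ∀ i < m, ¬ P i)
    (hm' : m' ≤ n) (hm1' : m' < n → P m') (hm2' : ∀ i < m', ¬ P i) : m = m' := by
  by_contra hne
  rcases Nat.lt_or_ge m m' with h | h
  · exact hm2' m h (hm1 (by omega))
  · have : m' < m := by omega
    exact hm2 m' this (hm1' (by omega))

lemma pvCut_eq_firstHit (cs : List Char) :
    (let cutHash := PySem.Chars.find cs ['#']
     let cutDash := PySem.Chars.find cs ['-', '-', ' ']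
     if cutHash = -1 then (if cutDash = -1 then cs.length else cutDash.toNat)
     else if cutDash = -1 then cutHash.toNat else min cutHash.toNat cutDash.toNat)
    = pvFirstHit cs := by
  set h := PySem.Chars.find cs ['#'] with hh
  set d := PySem.Chars.find cs ['-', '-', ' '] with hd
  set cut : Nat := if h = -1 then (if d = -1 then cs.length else d.toNat)
    else if d = -1 then h.toNat else min h.toNat d.toNat with hcut
  show cut = pvFirstHit cs
  -- facts about h
  have hHne : h ≠ -1 → ['#'] <+: cs.drop h.toNat ∧ ∀ i < h.toNat, ¬ ['#'] <+: cs.drop i := by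
    intro hne
    have h0 : 0 ≤ h := by
      have := PySem.Chars.neg_one_le_find cs ['#']
      rw [← hh] at this; omega
    have := PySem.Chars.find_spec (s := cs) (sub := ['#']) (by rw [← hh]; exact h0)
    rw [← hh] at this; exact this
  have hHeq : h = -1 → ∀ i, ¬ ['#'] <+: cs.drop i := by
    intro he i hp
    have : ¬ (['#'] <:+: cs) := (PySem.Chars.find_eq_neg_one_iff cs ['#']).mp (by rw [← hh]; exact he)
    exact this (pvPrefix_drop_infix hp)
  have hDne : d ≠ -1 → ['-','-',' '] <+: cs.drop d.toNat ∧ ∀ i < d.toNat, ¬ ['-','-',' '] <+: cs.drop i := by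
    intro hne
    have h0 : 0 ≤ d := by
      have := PySem.Chars.neg_one_le_find cs ['-','-',' ']
      rw [← hd] at this; omega
    have := PySem.Chars.find_spec (s := cs) (sub := ['-','-',' ']) (by rw [← hd]; exact h0)
    rw [← hd] at this; exact this
  have hDeq : d = -1 → ∀ i, ¬ ['-','-',' '] <+: cs.drop i := by
    intro he i hp
    have : ¬ (['-','-',' '] <:+: cs) := (PySem.Chars.find_eq_neg_one_iff cs _).mp (by rw [← hd]; exact he)
    exact this (pvPrefix_drop_infix hp)
  -- cut satisfies the three first-index properties for pvHit ∘ drop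
  have hlt_of_prefix : ∀ (sub : List Char), sub ≠ [] → ∀ k : Nat, sub <+: cs.drop k → k < cs.length := by
    intro sub hne k hp
    by_contra hge
    have : cs.drop k = [] := List.drop_eq_nil_of_le (by omega)
    rw [this] at hp
    exact hne (List.prefix_nil.mp hp)
  have c1 : cut ≤ cs.length := by
    rw [hcut]
    split_ifs with e1 e2 e3
    · rfl
    · have := (hlt_of_prefix ['-','-',' '] (by simp) d.toNat (hDne e2).1); omega
    · have := (hlt_of_prefix ['#'] (by simp) h.toNat (hHne e1).1); omega
    · have h1 := (hlt_of_prefix ['#'] (by simp) h.toNat (hHne e1).1)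
      have h2 := (hlt_of_prefix ['-','-',' '] (by simp) d.toNat (hDne e3).1)
      omega
  have c2 : cut < cs.length → pvHit (cs.drop cut) = true := by
    intro hlt
    rw [pvHit_iff]
    rw [hcut] at hlt ⊢
    split_ifs at hlt ⊢ with e1 e2 e3
    · omega
    · right; exact (hDne e2).1
    · left; exact (hHne e1).1
    · rcases Nat.le_total h.toNat d.toNat with hle | hle
      · left; rw [min_eq_left hle]; exact (hHne e1).1
      · right; rw [min_eq_right hle]; exact (hDne e3).1
  have c3 : ∀ i < cut, ¬ pvHit (cs.drop i) = true := by
    intro i hi hp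
    rw [pvHit_iff] at hp
    rw [hcut] at hi
    split_ifs at hi with e1 e2 e3
    · rcases hp with hp | hp
      · exact hHeq e1 i hp
      · exact hDeq e2 i hp
    · rcases hp with hp | hp
      · exact hHeq e1 i hp
      · exact (hDne e2).2 i hi hp
    · rcases hp with hp | hp
      · exact (hHne e1).2 i hi hp
      · exact hDeq e3 i hp
    · rcases hp with hp | hp
      · exact (hHne e1).2 i (by omega) hp
      · exact (hDne e3).2 i (by omega) hp
  exact pvFirst_unique cs.length (fun i => pvHit (cs.drop i) = true) cut (pvFirstHit cs)
    c1 c2 c3 (pvFirstHit_le cs) (pvFirstHit_hit cs) (pvFirstHit_min cs)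

-- ===== VERDICT (by name: the statement is the Claim_ definition above) =====
theorem tamper_spec : Claim_equal_tamper := by
  intro payload _
  unfold Spec_tamper tamper tamper_alt
  by_cases he : payload = ""
  · simp [he]
  · simp only [if_neg he]
    rw [tamperLoopA_eq_cut]
    rw [pvCut_eq_firstHit payload.toList]
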